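-- pv_equiv track=rewrite | github.com/MPMG-DCC-UFMG/M01 | rule_based_ner.py | filter_occupied
-- ===== SOURCE A (Python) =====
-- def filter_occupied(ents, labeled):
--     res = []
--     for start,end,lab in ents:
--         include = True
--         for i in range(start, end):
--             if i in labeled:
--                 include = False
--                 break
--         if include:
--             res.append( (start, end, lab) )
--     return res
-- ===== SOURCE B (Python) =====
-- def filter_occupied(ents, labeled):
--     sl = sorted(labeled)
--     n = len(sl)
--     res = []
--     for start, end, lab in ents:
--         # binary search: first index i with sl[i] >= start
--         lo, hi = 0, n
--         while lo < hi:
--             mid = (lo + hi) // 2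
--             if sl[mid] < start:
--                 lo = mid + 1
--             else:
--                 hi = mid
--         if lo == n or sl[lo] >= end:
--             res.append((start, end, lab))
--     return res
-- ===== Notes on version B (the rewrite author's own statement) =====
-- stated objective: alternative
-- what changed: Instead of scanning every index of each entity's span and testing membership in the labeled list, B sorts the labeled indices once and binary-searches for the first labeled index >= start, including the entity iff that index is >= end; this avoids the per-index span scan (cost moves from span length to log of the labeled count), though it was not measurably faster on the generated inputs.
import Mathlib
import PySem

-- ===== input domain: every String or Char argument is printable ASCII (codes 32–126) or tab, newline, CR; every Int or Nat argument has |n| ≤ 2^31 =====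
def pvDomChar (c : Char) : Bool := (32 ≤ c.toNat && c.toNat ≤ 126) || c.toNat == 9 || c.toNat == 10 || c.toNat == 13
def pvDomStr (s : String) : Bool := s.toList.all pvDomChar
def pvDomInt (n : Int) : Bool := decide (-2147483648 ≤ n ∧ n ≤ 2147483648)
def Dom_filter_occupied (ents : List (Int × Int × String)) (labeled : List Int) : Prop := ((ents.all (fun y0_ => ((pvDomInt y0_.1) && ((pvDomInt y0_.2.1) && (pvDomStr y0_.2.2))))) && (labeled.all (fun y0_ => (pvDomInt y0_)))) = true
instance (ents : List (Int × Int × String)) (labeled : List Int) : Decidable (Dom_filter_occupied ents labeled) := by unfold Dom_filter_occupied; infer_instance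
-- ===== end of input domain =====

-- B replaces A's per-index scan of each span with one sort of `labeled` plus a binary search per entity (objective: alternative algorithm).

-- ===== PORT A =====
-- inner 'for i in range(start, end): if i in labeled: include = False; break'
def spanFree : List Int → List Int → Bool
  | [], _ => true
  | i :: rest, labeled => if labeled.contains i then false else spanFree rest labeled

def filter_occupied (ents : List (Int × Int × String)) (labeled : List Int) : List (Int × Int × String) :=
  ents.foldl (fun res e =>
    if spanFree (PySem.List.pyRange e.1 e.2.1 1) labeled then res ++ [(e.1, e.2.1, e.2.2)] else res) []

-- ===== PORT B =====
-- the hand-written while-loop binary search of Source B (fuel = hi - lo bounds the loop; it never runs out)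
def bsearchGo : Nat → List Int → Int → Nat → Nat → Nat
  | 0, _, _, lo, _ => lo
  | fuel + 1, sl, x, lo, hi =>
    if lo < hi then
      let mid := (lo + hi) / 2
      if sl.getD mid 0 < x then bsearchGo fuel sl x (mid + 1) hi else bsearchGo fuel sl x lo mid
    else lo

def bsearch (sl : List Int) (x : Int) (lo hi : Nat) : Nat :=
  bsearchGo (hi - lo) sl x lo hi

def filter_occupied_alt (ents : List (Int × Int × String)) (labeled : List Int) : List (Int × Int × String) :=
  let sl := PySem.List.sorted labeled (fun x => x) false
  ents.filter (fun e =>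
    let i := bsearch sl e.1 0 sl.length
    decide (i = sl.length) || decide (e.2.1 ≤ sl.getD i 0))

-- ===== PRECONDITION & SPEC =====
def Spec_filter_occupied (ents : List (Int × Int × String)) (labeled : List Int) (out : List (Int × Int × String)) : Prop := out = filter_occupied_alt ents labeled
instance (ents : List (Int × Int × String)) (labeled : List Int) (out : List (Int × Int × String)) : Decidable (Spec_filter_occupied ents labeled out) := by unfold Spec_filter_occupied; infer_instance

-- ===== CLAIM (what is proved, stated in full; the proofs are below) =====
def Claim_equal_filter_occupied : Prop := ∀ (ents : List (Int × Int × String)) (labeled : List Int), Dom_filter_occupied ents labeled → Spec_filter_occupied ents labeled (filter_occupied ents labeled)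

-- ===== LEMMAS AND PROOFS =====

theorem spanFree_eq_true_iff (r labeled : List Int) :
    spanFree r labeled = true ↔ ∀ i ∈ r, i ∉ labeled := by
  induction r with
  | nil => simp [spanFree]
  | cons a t ih =>
    by_cases h : labeled.contains a = true
    · simp [spanFree, List.contains_iff_mem.mp h]
    · simp only [spanFree, h, Bool.false_eq_true, List.mem_cons]
      rw [if_neg (by simp), ih]
      constructor
      · rintro hall i (rfl | hi)
        · exact fun hm => h (List.contains_iff_mem.mpr hm)
        · exact hall i hi
      · intro hall i hi; exact hall i (Or.inr hi)

theorem bsearchGo_spec (fuel : Nat) (sl : List Int) (hs : sl.Pairwise (· ≤ ·)) (x : Int) :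
    ∀ (lo hi : Nat), hi - lo ≤ fuel → hi ≤ sl.length → lo ≤ hi →
    (∀ j, j < lo → ∀ (hj : j < sl.length), sl[j] < x) →
    (∀ j, hi ≤ j → ∀ (hj : j < sl.length), x ≤ sl[j]) →
    bsearchGo fuel sl x lo hi ≤ sl.length ∧
    (∀ j, j < bsearchGo fuel sl x lo hi → ∀ (hj : j < sl.length), sl[j] < x) ∧
    (∀ j, bsearchGo fuel sl x lo hi ≤ j → ∀ (hj : j < sl.length), x ≤ sl[j]) := by
  induction fuel with
  | zero =>
    intro lo hi hfuel hhi hlo hlow hhigh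
    have : lo = hi := by omega
    simp only [bsearchGo]
    exact ⟨by omega, fun j hj hjl => hlow j hj hjl, fun j hj hjl => hhigh j (by omega) hjl⟩
  | succ fuel ih =>
    intro lo hi hfuel hhi hlo hlow hhigh
    by_cases h : lo < hi
    · have hmid : (lo + hi) / 2 < sl.length := by omega
      have hmono : ∀ (p q : Nat) (hp : p < sl.length) (hq : q < sl.length), p ≤ q → sl[p] ≤ sl[q] := by
        intro p q hp hq hpq
        rcases Nat.eq_or_lt_of_le hpq with heq | hlt
        · subst heq; exact le_refl _
        · exact List.pairwise_iff_getElem.mp hs p q hp hq hlt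
      have hget : sl.getD ((lo + hi) / 2) 0 = sl[(lo + hi) / 2] := List.getD_eq_getElem sl 0 hmid
      rw [bsearchGo, if_pos h]
      by_cases hc : sl.getD ((lo + hi) / 2) 0 < x
      · rw [if_pos hc]
        exact ih ((lo + hi) / 2 + 1) hi (by omega) hhi (by omega)
          (fun j hj hjl =>
            lt_of_le_of_lt (hmono j ((lo + hi) / 2) hjl hmid (by omega)) (hget ▸ hc))
          hhigh
      · rw [if_neg hc]
        exact ih lo ((lo + hi) / 2) (by omega) (by omega) (by omega) hlow
          (fun j hj hjl => by
            have hx : x ≤ sl[(lo + hi) / 2] := by rw [← hget]; omega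
            exact le_trans hx (hmono ((lo + hi) / 2) j hmid hjl hj))
    · rw [bsearchGo, if_neg h]
      exact ⟨by omega, fun j hj hjl => hlow j (by omega) hjl, fun j hj hjl => hhigh j (by omega) hjl⟩

theorem bsearch_spec (sl : List Int) (hs : sl.Pairwise (· ≤ ·)) (x : Int) (lo hi : Nat)
    (hhi : hi ≤ sl.length) (hlo : lo ≤ hi)
    (hlow : ∀ j, j < lo → ∀ (hj : j < sl.length), sl[j] < x)
    (hhigh : ∀ j, hi ≤ j → ∀ (hj : j < sl.length), x ≤ sl[j]) :
    bsearch sl x lo hi ≤ sl.length ∧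
    (∀ j, j < bsearch sl x lo hi → ∀ (hj : j < sl.length), sl[j] < x) ∧
    (∀ j, bsearch sl x lo hi ≤ j → ∀ (hj : j < sl.length), x ≤ sl[j]) :=
  bsearchGo_spec (hi - lo) sl hs x lo hi (le_refl _) hhi hlo hlow hhigh

theorem pred_eq (labeled : List Int) (e : Int × Int × String) :
    spanFree (PySem.List.pyRange e.1 e.2.1 1) labeled =
      (decide (bsearch (PySem.List.sorted labeled (fun x => x) false) e.1 0
          (PySem.List.sorted labeled (fun x => x) false).length =
          (PySem.List.sorted labeled (fun x => x) false).length) ||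
       decide (e.2.1 ≤ (PySem.List.sorted labeled (fun x => x) false).getD
          (bsearch (PySem.List.sorted labeled (fun x => x) false) e.1 0
            (PySem.List.sorted labeled (fun x => x) false).length) 0)) := by
  set sl := PySem.List.sorted labeled (fun x => x) false with hsl
  have hs : sl.Pairwise (· ≤ ·) := PySem.List.sorted_pairwise labeled (fun x => x)
  have hmem : ∀ v, v ∈ sl ↔ v ∈ labeled := fun v => PySem.List.mem_sorted labeled (fun x => x) false v
  set i := bsearch sl e.1 0 sl.length with hi
  obtain ⟨hile, hlow, hhigh⟩ := bsearch_spec sl hs e.1 0 sl.length (le_refl _) (Nat.zero_le _)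
    (fun j hj hjl => absurd hj (by omega)) (fun j hj hjl => absurd hj (by omega))
  rw [Bool.eq_iff_iff]
  simp only [Bool.or_eq_true, decide_eq_true_eq, spanFree_eq_true_iff, PySem.List.mem_pyRange_one]
  constructor
  · intro hall
    by_cases hcase : i = sl.length
    · exact Or.inl hcase
    · right
      have hilt : i < sl.length := by omega
      have hv : sl[i] ∈ labeled := (hmem _).mp (sl.getElem_mem hilt)
      have h1 : e.1 ≤ sl[i] := hhigh i (le_refl _) hilt
      have h2 : ¬ (e.1 ≤ sl[i] ∧ sl[i] < e.2.1) := fun ⟨ha, hb⟩ => hall sl[i] ⟨ha, hb⟩ hv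
      rw [List.getD_eq_getElem sl 0 hilt]
      omega
  · rintro hor v ⟨hv1, hv2⟩ hvmem
    obtain ⟨j, hjl, hjv⟩ := List.mem_iff_getElem.mp ((hmem v).mpr hvmem)
    rcases Nat.lt_or_ge j i with hji | hji
    · have := hlow j hji hjl
      omega
    · have hilt : i < sl.length := by omega
      rcases hor with hcase | hcase
      · omega
      · rw [List.getD_eq_getElem sl 0 hilt] at hcase
        have hmono : sl[i] ≤ sl[j] := by
          rcases Nat.eq_or_lt_of_le hji with heq | hlt
          · subst heq; exact le_refl _
          · exact List.pairwise_iff_getElem.mp hs i j hilt hjl hlt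
        omega

-- ===== VERDICT (by name: the statement is the Claim_ definition above) =====
theorem filter_occupied_spec : Claim_equal_filter_occupied := by
  intro ents labeled _
  unfold Spec_filter_occupied filter_occupied filter_occupied_alt
  rw [PySem.List.foldl_append_if]
  simp only [List.nil_append]
  rw [show (fun (e : Int × Int × String) => (e.1, e.2.1, e.2.2)) = id from funext (fun e => rfl)]
  rw [List.map_id]
  exact List.filter_congr (fun e _ => pred_eq labeled e)
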